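-- pv_equiv track=rewrite | github.com/michaelandrewkearney/covid-vs-mta-ridership | ridership_data/turnstile.py | get_buffered_boundaries
-- ===== SOURCE A (Python) =====
-- def get_buffered_boundaries(idxs=[], buffer=10, proximity=None, minindex=None, maxindex=None):
--     if proximity == None:
--         proximity = buffer*2
--     if not idxs:
--         return []
--     if minindex is None:
--         minindex = min(idxs)
--     if maxindex is None:
--         maxindex = max(idxs)
--     boundaries = []
--     idxs = sorted(list(idxs))
--     while idxs:
--         start = end = idxs.pop()
--         while idxs and start - idxs[-1] <= proximity:
--             start = idxs.pop()
--         boundaries.append((max(start-buffer, minindex), start, end, min(end+buffer, maxindex)))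
--     return boundaries
-- ===== SOURCE B (Python) =====
-- def get_buffered_boundaries(idxs=[], buffer=10, proximity=None, minindex=None, maxindex=None):
--     if proximity is None:
--         proximity = buffer * 2
--     if not idxs:
--         return []
--     if minindex is None:
--         minindex = min(idxs)
--     if maxindex is None:
--         maxindex = max(idxs)
--     s = sorted(idxs)
--     n = len(s)
--     # break positions: a new cluster starts at i when the gap to the previous element exceeds proximity
--     breaks = [i for i in range(1, n) if s[i] - s[i - 1] > proximity]
--     edges = [0] + breaks + [n]
--     out = []
--     for a, b in zip(edges, edges[1:]):
--         lo, hi = s[a], s[b - 1]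
--         out.append((max(lo - buffer, minindex), lo, hi, min(hi + buffer, maxindex)))
--     out.reverse()
--     return out
-- ===== Notes on version B (the rewrite author's own statement) =====
-- stated objective: alternative
-- what changed: A consumes the sorted list destructively from the top with nested while-loops popping one element at a time; B computes all break positions (gaps > proximity) in one comprehension over the ascending sorted list, slices it by those break indices, maps each slice to its buffered tuple and reverses once to match A's descending order.
import Mathlib
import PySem

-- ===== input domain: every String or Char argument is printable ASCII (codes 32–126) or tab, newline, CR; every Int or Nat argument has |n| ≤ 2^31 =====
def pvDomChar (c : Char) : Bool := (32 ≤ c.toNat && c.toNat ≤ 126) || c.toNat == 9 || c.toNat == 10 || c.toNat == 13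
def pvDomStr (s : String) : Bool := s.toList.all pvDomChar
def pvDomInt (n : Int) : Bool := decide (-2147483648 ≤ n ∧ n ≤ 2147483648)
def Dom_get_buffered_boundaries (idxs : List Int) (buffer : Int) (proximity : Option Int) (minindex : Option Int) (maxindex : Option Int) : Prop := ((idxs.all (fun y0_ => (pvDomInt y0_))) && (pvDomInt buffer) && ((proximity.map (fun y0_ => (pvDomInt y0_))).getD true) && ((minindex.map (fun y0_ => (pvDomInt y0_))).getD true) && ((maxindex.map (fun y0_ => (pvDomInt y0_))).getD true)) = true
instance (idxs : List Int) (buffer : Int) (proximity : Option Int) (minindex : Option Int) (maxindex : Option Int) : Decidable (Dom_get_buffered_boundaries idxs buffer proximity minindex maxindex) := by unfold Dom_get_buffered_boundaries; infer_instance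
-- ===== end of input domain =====

-- B replaces A's destructive nested pop-from-end loops by a breaks-then-slice pass over the
-- ascending sorted list (same values, same order; A does not mutate its caller's list).


-- ===== PORT A =====
-- inner while loop: 'while idxs and start - idxs[-1] <= proximity: start = idxs.pop()',
-- with pop-from-end modeled as head-consumption of the reversed (descending) list
def pvInnerA (p : Int) (start : Int) : List Int → Int × List Int
  | [] => (start, [])
  | x :: xs => if start - x ≤ p then pvInnerA p x xs else (start, x :: xs)

theorem pvInnerA_length (p start : Int) (xs : List Int) : (pvInnerA p start xs).2.length ≤ xs.length := by
  induction xs generalizing start with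
  | nil => simp [pvInnerA]
  | cons x xs ih =>
    simp only [pvInnerA]
    split
    · exact Nat.le_trans (ih x) (Nat.le_succ _)
    · simp

-- outer while loop: 'while idxs: start = end = idxs.pop(); …; boundaries.append(…)'
def pvOuterA (buffer p mn mx : Int) : List Int → List (Int × Int × Int × Int) → List (Int × Int × Int × Int)
  | [], acc => acc
  | e :: rest, acc =>
    pvOuterA buffer p mn mx (pvInnerA p e rest).2
      (acc ++ [(max ((pvInnerA p e rest).1 - buffer) mn, (pvInnerA p e rest).1, e, min (e + buffer) mx)])
  termination_by l _ => l.length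
  decreasing_by
    have := pvInnerA_length p e rest
    simp only [List.length_cons]
    omega

def get_buffered_boundaries (idxs : List Int) (buffer : Int) (proximity : Option Int) (minindex : Option Int) (maxindex : Option Int) : List (Int × Int × Int × Int) :=
  let p := match proximity with
    | none => buffer * 2
    | some q => q
  if idxs = [] then []
  else
    let mn := match minindex with
      | none => (PySem.List.min? idxs (fun y => y)).getD 0
      | some v => v
    let mx := match maxindex with
      | none => (PySem.List.max? idxs (fun y => y)).getD 0
      | some v => v
    -- idxs = sorted(list(idxs)); the pop-from-end loops walk the reversed sorted list
    pvOuterA buffer p mn mx (PySem.List.sorted idxs (fun y => y) false).reverse []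

-- ===== PORT B =====
-- breaks = [i for i in range(1, n) if s[i] - s[i-1] > proximity]
-- (all indices used below are provably in range, so s[i] is modeled exactly by pyGetD s i 0)
def pvBreaks (p : Int) (s : List Int) : List Int :=
  (PySem.List.pyRange 1 (s.length : Int) 1).filter
    (fun i => decide (PySem.List.pyGetD s i 0 - PySem.List.pyGetD s (i - 1) 0 > p))

-- the appended tuple (max(lo-buffer, minindex), lo, hi, min(hi+buffer, maxindex))
def pvTuple (buffer mn mx lo hi : Int) : Int × Int × Int × Int :=
  (max (lo - buffer) mn, lo, hi, min (hi + buffer) mx)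

-- edges = [0] + breaks + [n]; out = [tuple for a, b in zip(edges, edges[1:])]  (before the final reverse)
def pvBcore (buffer p mn mx : Int) (s : List Int) : List (Int × Int × Int × Int) :=
  let edges := (0 : Int) :: (pvBreaks p s ++ [(s.length : Int)])
  (edges.zip (edges.drop 1)).map
    (fun ab => pvTuple buffer mn mx (PySem.List.pyGetD s ab.1 0) (PySem.List.pyGetD s (ab.2 - 1) 0))

def get_buffered_boundaries_alt (idxs : List Int) (buffer : Int) (proximity : Option Int) (minindex : Option Int) (maxindex : Option Int) : List (Int × Int × Int × Int) :=
  let p := match proximity with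
    | none => buffer * 2
    | some q => q
  if idxs = [] then []
  else
    let mn := match minindex with
      | none => (PySem.List.min? idxs (fun y => y)).getD 0
      | some v => v
    let mx := match maxindex with
      | none => (PySem.List.max? idxs (fun y => y)).getD 0
      | some v => v
    (pvBcore buffer p mn mx (PySem.List.sorted idxs (fun y => y) false)).reverse

-- ===== PRECONDITION & SPEC =====
def Spec_get_buffered_boundaries (idxs : List Int) (buffer : Int) (proximity : Option Int) (minindex : Option Int) (maxindex : Option Int) (out : List (Int × Int × Int × Int)) : Prop := out = get_buffered_boundaries_alt idxs buffer proximity minindex maxindex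
instance (idxs : List Int) (buffer : Int) (proximity : Option Int) (minindex : Option Int) (maxindex : Option Int) (out : List (Int × Int × Int × Int)) : Decidable (Spec_get_buffered_boundaries idxs buffer proximity minindex maxindex out) := by unfold Spec_get_buffered_boundaries; infer_instance

-- ===== CLAIM (what is proved, stated in full; the proofs are below) =====
def Claim_equal_get_buffered_boundaries : Prop := ∀ (idxs : List Int) (buffer : Int) (proximity : Option Int) (minindex : Option Int) (maxindex : Option Int), Dom_get_buffered_boundaries idxs buffer proximity minindex maxindex → Spec_get_buffered_boundaries idxs buffer proximity minindex maxindex (get_buffered_boundaries idxs buffer proximity minindex maxindex)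

-- ===== LEMMAS AND PROOFS =====

-- pyGetD on an append, left and right parts
theorem pvGetD_append_left (s' c : List Int) (i : Int) (h0 : 0 ≤ i) (h1 : i < (s'.length : Int)) :
    PySem.List.pyGetD (s' ++ c) i 0 = PySem.List.pyGetD s' i 0 := by
  rw [PySem.List.pyGetD_eq_getElem (s' ++ c) 0 h0 (by simp only [List.length_append, Nat.cast_add]; omega),
      PySem.List.pyGetD_eq_getElem s' 0 h0 h1]
  exact List.getElem_append_left (by omega)

theorem pvGetD_append_right (s' c : List Int) (i : Int) (h0 : (s'.length : Int) ≤ i)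
    (h1 : i < ((s' ++ c).length : Int)) :
    PySem.List.pyGetD (s' ++ c) i 0 = PySem.List.pyGetD c (i - (s'.length : Int)) 0 := by
  have hc : i - (s'.length : Int) < (c.length : Int) := by
    simp only [List.length_append, Nat.cast_add] at h1; omega
  rw [PySem.List.pyGetD_eq_getElem (s' ++ c) 0 (by omega) h1,
      PySem.List.pyGetD_eq_getElem c 0 (by omega) hc]
  rw [List.getElem_append_right (by omega)]
  congr 1
  omega

-- the last element, by its (length-1) index
theorem pvGetD_last (l : List Int) (en : Int) (hl : l.getLast? = some en) :
    PySem.List.pyGetD l ((l.length : Int) - 1) 0 = en := by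
  obtain ⟨v, rfl⟩ := List.getLast?_eq_some_iff.mp hl
  rw [pvGetD_append_right v [en] _ (by simp only [List.length_append, List.length_cons,
        List.length_nil, Nat.cast_add, Nat.cast_one, Nat.cast_zero]; omega)
      (by simp only [List.length_append, List.length_cons, List.length_nil,
        Nat.cast_add, Nat.cast_one, Nat.cast_zero]; omega)]
  rw [show ((v ++ [en]).length : Int) - 1 - (v.length : Int) = 0 by
    simp only [List.length_append, List.length_cons, List.length_nil, Nat.cast_add,
      Nat.cast_one, Nat.cast_zero]; omega]
  rw [PySem.List.pyGetD_zero_cons]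

-- what the inner while loop consumes: a descending chain with gaps ≤ p, stopped at a gap > p
theorem pvInnerA_spec (p : Int) : ∀ (xs : List Int) (x : Int),
    ∃ mid : List Int,
      x :: xs = mid ++ (pvInnerA p x xs).2 ∧
      mid.head? = some x ∧
      mid.getLast? = some (pvInnerA p x xs).1 ∧
      List.IsChain (fun a b => a - b ≤ p) mid ∧
      (∀ w, (pvInnerA p x xs).2.head? = some w → (pvInnerA p x xs).1 - w > p) := by
  intro xs
  induction xs with
  | nil =>
    intro x
    exact ⟨[x], by simp [pvInnerA]⟩
  | cons y ys ih =>
    intro x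
    by_cases h : x - y ≤ p
    · obtain ⟨mid, hsplit, hhead, hlast, hchain, hstop⟩ := ih y
      obtain ⟨ms, rfl⟩ : ∃ ms, mid = y :: ms := by
        cases mid with
        | nil => simp at hhead
        | cons a ms =>
          simp only [List.head?_cons, Option.some.injEq] at hhead
          exact ⟨ms, by rw [hhead]⟩
      refine ⟨x :: y :: ms, ?_, rfl, ?_, ?_, ?_⟩
      · simp only [pvInnerA, if_pos h]
        rw [List.cons_append, ← hsplit]
      · simp only [pvInnerA, if_pos h]
        rw [List.getLast?_cons_cons]
        exact hlast
      · exact List.isChain_cons_cons.mpr ⟨h, hchain⟩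
      · simp only [pvInnerA, if_pos h]
        exact hstop
    · refine ⟨[x], by simp [pvInnerA, h], rfl, by simp [pvInnerA, h], by simp, ?_⟩
      intro w hw
      simp only [pvInnerA, if_neg h] at hw ⊢
      simp only [List.head?_cons, Option.some.injEq] at hw
      omega

-- zip(edges, edges[1:]) only pairs consecutive elements: dropLast on the left
theorem pvZipDropLast (E : List Int) : E.zip (E.drop 1) = E.dropLast.zip (E.drop 1) := by
  induction E with
  | nil => rfl
  | cons x t ih =>
    cases t with
    | nil => rfl
    | cons y u =>
      simp only [List.drop_one, List.tail_cons] at ih ⊢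
      rw [List.dropLast_cons₂, List.zip_cons_cons, List.zip_cons_cons, ih]

-- appending one more edge appends one consecutive pair
theorem pvZipSnoc (E : List Int) (w z : Int) (h : E.getLast? = some w) :
    (E ++ [z]).zip ((E ++ [z]).drop 1) = E.zip (E.drop 1) ++ [(w, z)] := by
  induction E with
  | nil => simp at h
  | cons x t ih =>
    cases t with
    | nil =>
      simp only [List.getLast?_singleton, Option.some.injEq] at h
      subst h
      rfl
    | cons y u =>
      have h' : (y :: u).getLast? = some w := by rwa [List.getLast?_cons_cons] at h
      have hih := ih h'
      simp only [List.cons_append, List.drop_one, List.tail_cons] at hih ⊢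
      rw [List.zip_cons_cons, hih, List.zip_cons_cons]
      rfl

-- break indices lie strictly inside the list
theorem pvBreaks_mem (p : Int) (s : List Int) (i : Int) (h : i ∈ pvBreaks p s) :
    1 ≤ i ∧ i < (s.length : Int) := by
  unfold pvBreaks at h
  have := List.mem_filter.mp h
  exact (PySem.List.mem_pyRange_one).mp this.1

-- a single cluster (all gaps ≤ p) produces exactly one tuple
theorem pvBcore_single (buffer p mn mx : Int) (c : List Int) (st en : Int)
    (hh : c.head? = some st) (hl : c.getLast? = some en)
    (hchain : List.IsChain (fun a b => b - a ≤ p) c) :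
    pvBcore buffer p mn mx c = [pvTuple buffer mn mx st en] := by
  obtain ⟨t, rfl⟩ : ∃ t, c = st :: t := by
    cases c with
    | nil => simp at hh
    | cons a t =>
      simp only [List.head?_cons, Option.some.injEq] at hh
      exact ⟨t, by rw [hh]⟩
  have hbr : pvBreaks p (st :: t) = [] := by
    unfold pvBreaks
    rw [List.filter_eq_nil_iff]
    intro i hi
    have hib := PySem.List.mem_pyRange_one.mp hi
    simp only [decide_eq_true_eq, not_lt]
    have hg := List.isChain_iff_getElem.mp hchain (i - 1).toNat (by omega)
    rw [PySem.List.pyGetD_eq_getElem _ 0 (by omega) (by omega),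
        PySem.List.pyGetD_eq_getElem _ 0 (by omega) (by omega)]
    simp only [show i.toNat = (i - 1).toNat + 1 from by omega]
    omega
  simp only [pvBcore]
  rw [hbr]
  simp only [List.nil_append, List.drop_one, List.tail_cons, List.zip_cons_cons,
    List.zip_nil_right, List.map_cons, List.map_nil]
  rw [PySem.List.pyGetD_zero_cons, pvGetD_last _ _ hl]

-- appending a final cluster (gap > p at the junction, gaps ≤ p inside) appends one tuple
theorem pvBcore_snoc (buffer p mn mx : Int) (s' c : List Int) (st en w : Int)
    (hs' : s' ≠ []) (hh : c.head? = some st) (hl : c.getLast? = some en)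
    (hw : s'.getLast? = some w) (hb : st - w > p)
    (hchain : List.IsChain (fun a b => b - a ≤ p) c) :
    pvBcore buffer p mn mx (s' ++ c) = pvBcore buffer p mn mx s' ++ [pvTuple buffer mn mx st en] := by
  obtain ⟨t, rfl⟩ : ∃ t, c = st :: t := by
    cases c with
    | nil => simp at hh
    | cons a t =>
      simp only [List.head?_cons, Option.some.injEq] at hh
      exact ⟨t, by rw [hh]⟩
  set c := st :: t with hc
  have hm1 : 1 ≤ s'.length := List.length_pos_of_ne_nil hs'
  have hk1 : 1 ≤ c.length := by rw [hc]; simp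
  have hlenapp : (s' ++ c).length = s'.length + c.length := by
    simp only [List.length_append]
  -- the value at the junction and the one before it
  have hmid : PySem.List.pyGetD (s' ++ c) (s'.length : Int) 0 = st := by
    rw [pvGetD_append_right s' c _ le_rfl (by rw [hlenapp]; push_cast; omega)]
    rw [show (s'.length : Int) - (s'.length : Int) = 0 by omega, hc,
      PySem.List.pyGetD_zero_cons]
  have hprev : PySem.List.pyGetD (s' ++ c) ((s'.length : Int) - 1) 0 = w := by
    rw [pvGetD_append_left s' c _ (by omega) (by omega)]
    exact pvGetD_last s' w hw
  -- step 1: the break list of s' ++ c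
  have hbr : pvBreaks p (s' ++ c) = pvBreaks p s' ++ [(s'.length : Int)] := by
    unfold pvBreaks
    rw [show (((s' ++ c).length : Int)) = (s'.length : Int) + (c.length : Int) by
        rw [hlenapp]; push_cast; omega,
        PySem.List.pyRange_one_append 1 (s'.length : Int) ((s'.length : Int) + (c.length : Int))
          (by omega) (by omega),
        List.filter_append]
    congr 1
    · -- indices inside s' see only s'
      apply List.filter_congr
      intro i hi
      have hib := PySem.List.mem_pyRange_one.mp hi
      rw [pvGetD_append_left s' c i (by omega) (by omega),
          pvGetD_append_left s' c (i - 1) (by omega) (by omega)]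
    · -- the junction is a break, nothing inside c is
      rw [PySem.List.pyRange_one_cons
        (show (s'.length : Int) < (s'.length : Int) + (c.length : Int) by omega)]
      rw [List.filter_cons_of_pos (by simp only [decide_eq_true_eq]; rw [hmid, hprev]; omega)]
      have hnil : List.filter
          (fun i => decide (PySem.List.pyGetD (s' ++ c) i 0 - PySem.List.pyGetD (s' ++ c) (i - 1) 0 > p))
          (PySem.List.pyRange ((s'.length : Int) + 1) ((s'.length : Int) + (c.length : Int))) = [] := by
        rw [List.filter_eq_nil_iff]
        intro i hi
        have hib := PySem.List.mem_pyRange_one.mp hi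
        simp only [decide_eq_true_eq, not_lt]
        rw [pvGetD_append_right s' c i (by omega) (by rw [hlenapp]; push_cast; omega),
            pvGetD_append_right s' c (i - 1) (by omega) (by rw [hlenapp]; push_cast; omega)]
        rw [PySem.List.pyGetD_eq_getElem c 0 (by omega) (by omega),
            PySem.List.pyGetD_eq_getElem c 0 (by omega) (by omega)]
        have hg := List.isChain_iff_getElem.mp hchain (i - 1 - (s'.length : Int)).toNat (by omega)
        simp only [show (i - (s'.length : Int)).toNat = (i - 1 - (s'.length : Int)).toNat + 1
          from by omega]
        omega
      rw [hnil]
  -- step 2: assemble edges and split the zip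
  simp only [pvBcore]
  rw [hbr]
  rw [show (0 : Int) :: ((pvBreaks p s' ++ [(s'.length : Int)]) ++ [((s' ++ c).length : Int)])
      = ((0 : Int) :: (pvBreaks p s' ++ [(s'.length : Int)])) ++ [((s' ++ c).length : Int)] by simp]
  set E := (0 : Int) :: (pvBreaks p s' ++ [(s'.length : Int)]) with hE
  have hEeq : E = ((0 : Int) :: pvBreaks p s') ++ [(s'.length : Int)] := by rw [hE]; simp
  have hElast : E.getLast? = some (s'.length : Int) := by rw [hEeq]; exact List.getLast?_concat
  rw [pvZipSnoc E (s'.length : Int) _ hElast, List.map_append]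
  congr 1
  · -- the old pairs see only s'
    rw [pvZipDropLast E]
    apply List.map_congr_left
    intro ab hab
    obtain ⟨ha, hbm⟩ := List.of_mem_zip hab
    have hdl : E.dropLast = (0 : Int) :: pvBreaks p s' := by rw [hEeq]; exact List.dropLast_concat
    have hdr : E.drop 1 = pvBreaks p s' ++ [(s'.length : Int)] := by rw [hE]; rfl
    rw [hdl] at ha
    rw [hdr] at hbm
    have hal : 0 ≤ ab.1 ∧ ab.1 < (s'.length : Int) := by
      rcases List.mem_cons.mp ha with h1 | h1
      · constructor <;> omega
      · have := pvBreaks_mem p s' _ h1; constructor <;> omega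
    have hbl : 1 ≤ ab.2 ∧ ab.2 ≤ (s'.length : Int) := by
      rcases List.mem_append.mp hbm with h1 | h1
      · have := pvBreaks_mem p s' _ h1; constructor <;> omega
      · simp only [List.mem_singleton] at h1; constructor <;> omega
    rw [pvGetD_append_left s' c ab.1 hal.1 hal.2,
        pvGetD_append_left s' c (ab.2 - 1) (by omega) (by omega)]
  · -- the new pair is the cluster tuple
    simp only [List.map_cons, List.map_nil]
    rw [hmid, pvGetD_last (s' ++ c) en (by
      rw [List.getLast?_append_of_ne_nil _ (by rw [hc]; simp)]
      exact hl)]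

-- main bridge: A's descending pop-loop on the reversed list = reversed breaks-and-slices result
theorem pvMain (buffer p mn mx : Int) : ∀ (N : Nat) (s : List Int), s.length ≤ N → s ≠ [] →
    ∀ acc, pvOuterA buffer p mn mx s.reverse acc = acc ++ (pvBcore buffer p mn mx s).reverse := by
  intro N
  induction N with
  | zero =>
    intro s hlen hne
    cases s <;> simp_all
  | succ N ih =>
    intro s hlen hne acc
    obtain ⟨e, rest, hrev⟩ : ∃ e rest, s.reverse = e :: rest := by
      cases hr : s.reverse with
      | nil => exact absurd (by simpa using congrArg List.reverse hr) hne
      | cons a l => exact ⟨a, l, rfl⟩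
    obtain ⟨mid, hsplit, hhead, hlast, hchain, hstop⟩ := pvInnerA_spec p rest e
    have hs : s = (pvInnerA p e rest).2.reverse ++ mid.reverse := by
      have h1 := congrArg List.reverse hrev
      rw [List.reverse_reverse] at h1
      rw [h1, hsplit]
      simp
    have hchain' : List.IsChain (fun a b => b - a ≤ p) mid.reverse := by
      rw [List.isChain_reverse]
      exact hchain
    have hch : mid.reverse.head? = some (pvInnerA p e rest).1 := by
      rw [List.head?_reverse]; exact hlast
    have hcl : mid.reverse.getLast? = some e := by
      rw [List.getLast?_reverse]; exact hhead
    rw [hrev]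
    rw [pvOuterA]
    by_cases hr2 : (pvInnerA p e rest).2 = []
    · rw [hr2, pvOuterA]
      rw [hs, hr2]
      simp only [List.reverse_nil, List.nil_append]
      rw [pvBcore_single buffer p mn mx mid.reverse _ _ hch hcl hchain']
      simp [pvTuple]
    · obtain ⟨w, hwh⟩ : ∃ w, (pvInnerA p e rest).2.head? = some w := by
        cases h2 : (pvInnerA p e rest).2 with
        | nil => exact absurd h2 hr2
        | cons a l => exact ⟨a, rfl⟩
      have hmlen : 1 ≤ mid.length := by
        cases mid with
        | nil => simp at hhead
        | cons a l => simp
      have hlen2 : (pvInnerA p e rest).2.reverse.length ≤ N := by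
        have h1 := congrArg List.length hsplit
        have h2 := congrArg List.length hrev
        simp only [List.length_cons, List.length_append, List.length_reverse] at h1 h2 ⊢
        omega
      have hne2 : (pvInnerA p e rest).2.reverse ≠ [] := by simpa using hr2
      have hrec := ih (pvInnerA p e rest).2.reverse hlen2 hne2
        (acc ++ [(max ((pvInnerA p e rest).1 - buffer) mn, (pvInnerA p e rest).1, e,
          min (e + buffer) mx)])
      rw [List.reverse_reverse] at hrec
      rw [hrec]
      have hwlast : (pvInnerA p e rest).2.reverse.getLast? = some w := by
        rw [List.getLast?_reverse]; exact hwh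
      rw [hs, pvBcore_snoc buffer p mn mx _ _ _ _ w hne2 hch hcl hwlast (hstop w hwh) hchain']
      simp [pvTuple]

-- ===== VERDICT (by name: the statement is the Claim_ definition above) =====
theorem get_buffered_boundaries_spec : Claim_equal_get_buffered_boundaries := by
  intro idxs buffer proximity minindex maxindex _
  unfold Spec_get_buffered_boundaries get_buffered_boundaries get_buffered_boundaries_alt
  by_cases hnil : idxs = []
  · simp [hnil]
  · simp only [if_neg hnil]
    have hs : (PySem.List.sorted idxs (fun y => y) false) ≠ [] := by
      have := PySem.List.length_sorted idxs (fun y => y) false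
      intro h
      rw [h] at this
      simp at this
      exact hnil (List.eq_nil_of_length_eq_zero this.symm)
    rw [pvMain _ _ _ _ _ _ (Nat.le_refl _) hs]
    simp
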